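-- pv_equiv track=rewrite | github.com/LiorB-D/AlgoEconFInal | utils.py | remove_irrelevant_edges
-- ===== SOURCE A (Python) =====
-- from collections import defaultdict
--
-- def remove_irrelevant_edges(adj, s, t):
--     if t in adj[s]:
--         adj_trim = defaultdict(list)
--         adj_trim[s].append(t)
--         adj_trim[t].append(s)
--         return adj_trim
--
--     def dfs(v, seen):
--         if v in seen:
--             return
--         seen.add(v)
--         for w in adj[v]:
--             dfs(w, seen)
--
--     seen_s = {s, t}
--     for w in adj[s]:
--         dfs(w, seen_s)
--     seen_t = {s, t}
--     for w in adj[t]: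
--         dfs(w, seen_t)
--
--     relevant = seen_s.intersection(seen_t)
--
--     adj_trim = defaultdict(list)
--
--     for v in relevant:
--         for w in adj[v]:
--             if w in relevant:
--                 adj_trim[v].append(w)
--
--     return adj_trim
-- ===== SOURCE B (Python) =====
-- from collections import defaultdict
--
-- def remove_irrelevant_edges(adj, s, t):
--     if t in adj[s]:
--         adj_trim = defaultdict(list)
--         adj_trim[s].append(t)
--         adj_trim[t].append(s)
--         return adj_trim
--
--     def sweep(seeds):
--         # iterative DFS: explicit stack instead of recursion; reversed pushes
--         # keep the exact recursive preorder, marking happens on pop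
--         seen = {s, t}
--         stack = list(seeds)[::-1]
--         while stack:
--             v = stack.pop()
--             if v in seen:
--                 continue
--             seen.add(v)
--             stack.extend(reversed(adj[v]))
--         return seen
--
--     seen_s = sweep(adj[s])
--     seen_t = sweep(adj[t])
--
--     relevant = seen_s.intersection(seen_t)
--
--     adj_trim = defaultdict(list)
--     for v in relevant:
--         for w in adj[v]:
--             if w in relevant:
--                 adj_trim[v].append(w)
--     return adj_trim
-- ===== Notes on version B (the rewrite author's own statement) =====
-- stated objective: alternative
-- what changed: The recursive dfs helper is replaced by an iterative stack-based traversal (explicit stack, reversed pushes, mark-on-pop) that visits vertices in the same preorder without recursion; the early-exit guard, the {s,t} seeds, the intersection and the final trimmed-adjacency build are unchanged.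
-- outside the precondition, e.g. on remove_irrelevant_edges({0: [], 1: [], 2: [5]}, 0, 1): A returns {}, B returns {}
import Mathlib
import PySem

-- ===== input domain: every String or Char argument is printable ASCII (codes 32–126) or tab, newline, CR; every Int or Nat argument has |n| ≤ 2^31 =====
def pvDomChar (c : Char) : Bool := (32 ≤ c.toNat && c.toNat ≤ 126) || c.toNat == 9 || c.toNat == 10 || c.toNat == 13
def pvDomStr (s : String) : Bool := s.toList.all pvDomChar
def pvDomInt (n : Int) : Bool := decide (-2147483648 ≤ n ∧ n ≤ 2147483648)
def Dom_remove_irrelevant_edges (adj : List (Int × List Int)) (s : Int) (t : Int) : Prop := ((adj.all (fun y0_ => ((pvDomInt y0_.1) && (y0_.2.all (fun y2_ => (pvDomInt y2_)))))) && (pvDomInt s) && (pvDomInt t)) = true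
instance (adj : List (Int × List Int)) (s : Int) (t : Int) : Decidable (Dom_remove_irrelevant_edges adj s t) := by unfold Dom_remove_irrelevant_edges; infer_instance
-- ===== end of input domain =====

-- B replaces A's recursive dfs by an iterative stack traversal visiting the same preorder; same cost, no recursion.


-- shared tiny helper: adj[v] (Python raises KeyError on a missing key; those inputs are outside Pre_, there we read [])
def pvAdjGet (adj : List (Int × List Int)) (v : Int) : List Int :=
  PySem.Dict.getD (PySem.Dict.mk adj) v []

-- ===== PORT A =====
-- fuel bound used only as a totality guard for A's recursion: number of distinct keys not yet seen
def pvKeys (adj : List (Int × List Int)) : List Int := PySem.List.dedup (adj.map Prod.fst)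

def pvUnseen (adj : List (Int × List Int)) (seen : PySem.Set Int) : Nat :=
  ((pvKeys adj).filter (fun x => !(PySem.Set.contains seen x))).length

-- A's recursive dfs(v, seen); the fuel (keys+1 at top level) is provably sufficient, it only guards totality
def pvDfsA (adj : List (Int × List Int)) : Nat → Int → PySem.Set Int → PySem.Set Int
  | 0, _, seen => seen
  | Nat.succ f, v, seen =>
    if PySem.Set.contains seen v then seen
    else (pvAdjGet adj v).foldl (fun se w => pvDfsA adj f w se) (PySem.Set.add seen v)

def remove_irrelevant_edges (adj : List (Int × List Int)) (s : Int) (t : Int) : List (Int × List Int) :=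
  if (pvAdjGet adj s).contains t then
    ((((PySem.Dict.empty : PySem.Dict Int (List Int)).modify s [] (· ++ [t])).modify t [] (· ++ [s]))).items
  else
    let F := (pvKeys adj).length + 1
    let seen_s := (pvAdjGet adj s).foldl (fun se w => pvDfsA adj F w se) (PySem.Set.ofList [s, t])
    let seen_t := (pvAdjGet adj t).foldl (fun se w => pvDfsA adj F w se) (PySem.Set.ofList [s, t])
    let relevant : PySem.Set Int := PySem.Set.inter seen_s seen_t
    (relevant.foldl (fun d v =>
        (pvAdjGet adj v).foldl (fun d w =>
            if PySem.Set.contains relevant w then PySem.Dict.modify d v [] (· ++ [w]) else d) d)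
      (PySem.Dict.empty : PySem.Dict Int (List Int))).items

-- ===== PORT B =====
-- lemmas cited by pvSweepB's termination proof (they must precede the definition)
theorem pv_contains_add_eq (seen : PySem.Set Int) (v x : Int) :
    PySem.Set.contains (PySem.Set.add seen v) x = (PySem.Set.contains seen x || x == v) := by
  rw [Bool.eq_iff_iff]
  simp [PySem.Set.mem_add]

theorem pvAdjGet_of_not_key (adj : List (Int × List Int)) (v : Int)
    (h : v ∉ adj.map Prod.fst) : pvAdjGet adj v = [] := by
  induction adj with
  | nil => rfl
  | cons p rest ih =>
    obtain ⟨k, ws⟩ := p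
    simp only [List.map_cons, List.mem_cons, not_or] at h
    have hne : (k == v) = false := by simpa [beq_iff_eq] using fun he => h.1 he.symm
    simpa [pvAdjGet, PySem.Dict.getD, PySem.Dict.get?_mk_cons, hne] using ih h.2

theorem pvUnseen_add_eq_of_not_key (adj : List (Int × List Int)) (seen : PySem.Set Int) (v : Int)
    (h : v ∉ adj.map Prod.fst) : pvUnseen adj (PySem.Set.add seen v) = pvUnseen adj seen := by
  unfold pvUnseen
  congr 1
  apply List.filter_congr
  intro x hx
  have hxv : x ≠ v := by
    intro he; subst he
    exact h (by simpa [pvKeys, PySem.List.mem_dedup] using hx)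
  simp [hxv]

theorem pvUnseen_add_lt (adj : List (Int × List Int)) (seen : PySem.Set Int) (v : Int)
    (hv : v ∈ adj.map Prod.fst) (hs : ¬ PySem.Set.contains seen v = true) :
    pvUnseen adj (PySem.Set.add seen v) < pvUnseen adj seen := by
  unfold pvUnseen
  have hfil : (pvKeys adj).filter (fun x => !(PySem.Set.contains (PySem.Set.add seen v) x))
      = ((pvKeys adj).filter (fun x => !(PySem.Set.contains seen x))).filter (fun x => !(x == v)) := by
    rw [List.filter_filter]
    apply List.filter_congr
    intro x _
    rw [pv_contains_add_eq, Bool.not_or, Bool.and_comm]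
  rw [hfil]
  apply List.length_filter_lt_length_iff_exists.mpr
  refine ⟨v, ?_, by simp⟩
  simp only [List.mem_filter]
  exact ⟨by simpa [pvKeys, PySem.List.mem_dedup] using hv, by simpa using hs⟩

-- B's iterative sweep; the Lean stack list is Python's stack reversed (head = top), so
-- Python's stack.extend(reversed(adj[v])) is 'pvAdjGet adj v ++ rest' and list(seeds)[::-1] makes the initial stack 'seeds'
def pvSweepB (adj : List (Int × List Int)) (stack : List Int) (seen : PySem.Set Int) : PySem.Set Int :=
  match stack with
  | [] => seen
  | v :: rest =>
    if PySem.Set.contains seen v then pvSweepB adj rest seen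
    else pvSweepB adj (pvAdjGet adj v ++ rest) (PySem.Set.add seen v)
termination_by (pvUnseen adj seen, stack.length)
decreasing_by
  · exact Prod.Lex.right _ (by simp)
  · by_cases hk : v ∈ adj.map Prod.fst
    · exact Prod.Lex.left _ _ (pvUnseen_add_lt adj seen v hk (by assumption))
    · rw [pvUnseen_add_eq_of_not_key adj seen v hk, pvAdjGet_of_not_key adj v hk]
      exact Prod.Lex.right _ (by simp)

def remove_irrelevant_edges_alt (adj : List (Int × List Int)) (s : Int) (t : Int) : List (Int × List Int) :=
  if (pvAdjGet adj s).contains t then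
    ((((PySem.Dict.empty : PySem.Dict Int (List Int)).modify s [] (· ++ [t])).modify t [] (· ++ [s]))).items
  else
    let seen_s := pvSweepB adj (pvAdjGet adj s) (PySem.Set.ofList [s, t])
    let seen_t := pvSweepB adj (pvAdjGet adj t) (PySem.Set.ofList [s, t])
    let relevant : PySem.Set Int := PySem.Set.inter seen_s seen_t
    (relevant.foldl (fun d v =>
        (pvAdjGet adj v).foldl (fun d w =>
            if PySem.Set.contains relevant w then PySem.Dict.modify d v [] (· ++ [w]) else d) d)
      (PySem.Dict.empty : PySem.Dict Int (List Int))).items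

-- ===== PRECONDITION & SPEC =====
-- Pre_ excludes inputs on which Python A raises KeyError (s, t or a visited vertex missing from adj, adj being a dict);
-- reachability is over-approximated in closed form by requiring every listed neighbor to be a key, which also excludes
-- some inputs with dangling neighbors in components A never visits (there A and B agree, see cites); association lists
-- with duplicate keys are excluded as well, since they have no dict counterpart (first-vs-last lookup is accidental).
def Pre_remove_irrelevant_edges (adj : List (Int × List Int)) (s : Int) (t : Int) : Prop :=
  (adj.map Prod.fst).Nodup ∧ s ∈ adj.map Prod.fst ∧
    (t ∈ pvAdjGet adj s ∨
      (t ∈ adj.map Prod.fst ∧ ∀ p ∈ adj, ∀ w ∈ p.2, w ∈ adj.map Prod.fst))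
instance (adj : List (Int × List Int)) (s : Int) (t : Int) : Decidable (Pre_remove_irrelevant_edges adj s t) := by
  unfold Pre_remove_irrelevant_edges; infer_instance

def pvWitness_remove_irrelevant_edges : (List (Int × List Int)) × Int × Int :=
  ([(0, [2]), (1, [2]), (2, [0, 1])], 0, 1)

def Spec_remove_irrelevant_edges (adj : List (Int × List Int)) (s : Int) (t : Int) (out : List (Int × List Int)) : Prop := out = remove_irrelevant_edges_alt adj s t
instance (adj : List (Int × List Int)) (s : Int) (t : Int) (out : List (Int × List Int)) : Decidable (Spec_remove_irrelevant_edges adj s t out) := by unfold Spec_remove_irrelevant_edges; infer_instance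

-- ===== CLAIM (what is proved, stated in full; the proofs are below) =====
def Claim_equal_remove_irrelevant_edges : Prop := ∀ (adj : List (Int × List Int)) (s : Int) (t : Int), Dom_remove_irrelevant_edges adj s t → Pre_remove_irrelevant_edges adj s t → Spec_remove_irrelevant_edges adj s t (remove_irrelevant_edges adj s t)

-- ===== LEMMAS AND PROOFS =====

-- everything already in seen stays in the dfs result
theorem pvDfsA_subset (adj : List (Int × List Int)) :
    ∀ (f : Nat) (v : Int) (seen : PySem.Set Int) (x : Int), x ∈ seen → x ∈ pvDfsA adj f v seen := by
  intro f
  induction f with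
  | zero => intro v seen x hx; simpa [pvDfsA] using hx
  | succ g ih =>
    intro v seen x hx
    simp only [pvDfsA]
    split
    · exact hx
    · have aux : ∀ (ws : List Int) (se : PySem.Set Int), x ∈ se →
          x ∈ ws.foldl (fun se w => pvDfsA adj g w se) se := by
        intro ws
        induction ws with
        | nil => intro se hse; simpa using hse
        | cons w ws' ihw => intro se hse; exact ihw _ (ih w se x hse)
      exact aux _ _ ((PySem.Set.mem_add _ _ _).mpr (Or.inl hx))

theorem pvFoldA_subset (adj : List (Int × List Int)) (f : Nat) :
    ∀ (ws : List Int) (seen : PySem.Set Int) (x : Int), x ∈ seen →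
      x ∈ ws.foldl (fun se w => pvDfsA adj f w se) seen := by
  intro ws
  induction ws with
  | nil => intro seen x hx; simpa using hx
  | cons w ws' ihw => intro seen x hx; exact ihw _ x (pvDfsA_subset adj f w seen x hx)

theorem pvUnseen_le_of_subset (adj : List (Int × List Int)) (s1 s2 : PySem.Set Int)
    (h : ∀ x, x ∈ s1 → x ∈ s2) : pvUnseen adj s2 ≤ pvUnseen adj s1 := by
  unfold pvUnseen
  simp only [← List.countP_eq_length_filter]
  apply List.countP_mono_left
  intro x _ hx
  simp only [Bool.not_eq_true', ← Bool.not_eq_true] at *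
  intro hc
  exact hx ((PySem.Set.contains_iff _ _).mpr (h x ((PySem.Set.contains_iff _ _).mp hc)))

-- the key bridge: the iterative sweep processes a stack segment exactly like A's sequential dfs calls
theorem pvBridge (adj : List (Int × List Int)) :
    ∀ (n : Nat) (ws st : List Int) (seen : PySem.Set Int) (f : Nat),
      pvUnseen adj seen = n → n < f →
      pvSweepB adj (ws ++ st) seen
        = pvSweepB adj st (ws.foldl (fun se w => pvDfsA adj f w se) seen) := by
  intro n
  induction n using Nat.strong_induction_on with
  | _ n IHn =>
    intro ws
    induction ws with
    | nil => intro st seen f _ _; simp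
    | cons w ws' ihw =>
      intro st seen f hn hf
      obtain ⟨g, rfl⟩ : ∃ g, f = g + 1 := ⟨f - 1, by omega⟩
      by_cases hc : PySem.Set.contains seen w = true
      · have hcm : w ∈ seen := (PySem.Set.contains_iff _ _).mp hc
        have h1 : pvSweepB adj ((w :: ws') ++ st) seen = pvSweepB adj (ws' ++ st) seen := by
          rw [pvSweepB.eq_def]; simp [hcm]
        have h2 : pvDfsA adj (g + 1) w seen = seen := by simp [pvDfsA, hcm]
        rw [h1, List.foldl_cons, h2, ihw st seen (g + 1) hn hf]
      · have hcm : w ∉ seen := fun h => hc ((PySem.Set.contains_iff _ _).mpr h)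
        have hstep : pvSweepB adj ((w :: ws') ++ st) seen
            = pvSweepB adj (pvAdjGet adj w ++ (ws' ++ st)) (PySem.Set.add seen w) := by
          rw [pvSweepB.eq_def]; simp [hcm]
        have hdfs : pvDfsA adj (g + 1) w seen
            = (pvAdjGet adj w).foldl (fun se v => pvDfsA adj g v se) (PySem.Set.add seen w) := by
          simp [pvDfsA, hcm]
        by_cases hk : w ∈ adj.map Prod.fst
        · -- w is a key: the unseen count strictly drops
          have hlt : pvUnseen adj (PySem.Set.add seen w) < n := hn ▸ pvUnseen_add_lt adj seen w hk hc
          have hinner := IHn (pvUnseen adj (PySem.Set.add seen w)) hlt (pvAdjGet adj w)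
            (ws' ++ st) (PySem.Set.add seen w) g rfl (by omega)
          set S1 := (pvAdjGet adj w).foldl (fun se v => pvDfsA adj g v se) (PySem.Set.add seen w) with hS1
          have hS1le : pvUnseen adj S1 ≤ pvUnseen adj (PySem.Set.add seen w) :=
            pvUnseen_le_of_subset adj _ _ (fun x hx => pvFoldA_subset adj g _ _ x hx)
          have houter := IHn (pvUnseen adj S1) (by omega) ws' st S1 (g + 1) rfl (by omega)
          rw [hstep, hinner, houter, List.foldl_cons, hdfs]
        · -- w is not a key: adj[w] is empty, the unseen count is unchanged
          have hkeq : pvUnseen adj (PySem.Set.add seen w) = n :=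
            hn ▸ pvUnseen_add_eq_of_not_key adj seen w hk
          rw [hstep, pvAdjGet_of_not_key adj w hk, List.nil_append,
            ihw st (PySem.Set.add seen w) (g + 1) hkeq hf, List.foldl_cons, hdfs,
            pvAdjGet_of_not_key adj w hk, List.foldl_nil]

theorem pvSweep_eq_fold (adj : List (Int × List Int)) (ws : List Int) (seen : PySem.Set Int) :
    pvSweepB adj ws seen
      = ws.foldl (fun se w => pvDfsA adj ((pvKeys adj).length + 1) w se) seen := by
  have h := pvBridge adj (pvUnseen adj seen) ws [] seen ((pvKeys adj).length + 1) rfl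
    (by have := List.length_filter_le (fun x => !(PySem.Set.contains seen x)) (pvKeys adj);
        unfold pvUnseen; omega)
  simpa [pvSweepB] using h

-- ===== VERDICT (by name: the statement is the Claim_ definition above) =====
theorem remove_irrelevant_edges_spec : Claim_equal_remove_irrelevant_edges := by
  intro adj s t _ _
  unfold Spec_remove_irrelevant_edges remove_irrelevant_edges remove_irrelevant_edges_alt
  by_cases hm : t ∈ pvAdjGet adj s
  · have hc : (pvAdjGet adj s).contains t = true := by simpa using hm
    rw [if_pos hc, if_pos hc]
  · have hc : ¬ (pvAdjGet adj s).contains t = true := by simpa using hm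
    rw [if_neg hc, if_neg hc]
    simp only [pvSweep_eq_fold]
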